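-- pv_equiv track=rewrite | github.com/ZhaoJ9014/Anti-UAV | anti_uav_jittor/anti_uav410_jit/datasets/antiuav410.py | _rename_seqs
-- ===== SOURCE A (Python) =====
-- def _rename_seqs(seq_names):
--     # in case some sequences may have multiple targets
--     renamed_seqs = []
--     for i, seq_name in enumerate(seq_names):
--         if seq_names.count(seq_name) == 1:
--             renamed_seqs.append(seq_name)
--         else:
--             ind = seq_names[:i + 1].count(seq_name)
--             renamed_seqs.append('%s.%d' % (seq_name, ind))
--
--     return renamed_seqs
-- ===== SOURCE B (Python) =====
-- def _rename_seqs(seq_names):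
--     # group-then-scatter: collect each name's positions, then fill an output
--     # slot array group by group (suffix = rank within the group): O(n)
--     positions = {}
--     for i, name in enumerate(seq_names):
--         positions.setdefault(name, []).append(i)
--     out = [''] * len(seq_names)
--     for name, idxs in positions.items():
--         if len(idxs) == 1:
--             out[idxs[0]] = name
--         else:
--             for k, i in enumerate(idxs):
--                 out[i] = '%s.%d' % (name, k + 1)
--     return out
-- ===== Notes on version B (the rewrite author's own statement) =====
-- stated objective: faster
-- what changed: Replaces A's per-element full-list and prefix-slice count() scans by a group-then-scatter algorithm: one pass groups each name's positions into a dict, then the output array is filled group by group using the rank inside each group as the suffix.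
import Mathlib
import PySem

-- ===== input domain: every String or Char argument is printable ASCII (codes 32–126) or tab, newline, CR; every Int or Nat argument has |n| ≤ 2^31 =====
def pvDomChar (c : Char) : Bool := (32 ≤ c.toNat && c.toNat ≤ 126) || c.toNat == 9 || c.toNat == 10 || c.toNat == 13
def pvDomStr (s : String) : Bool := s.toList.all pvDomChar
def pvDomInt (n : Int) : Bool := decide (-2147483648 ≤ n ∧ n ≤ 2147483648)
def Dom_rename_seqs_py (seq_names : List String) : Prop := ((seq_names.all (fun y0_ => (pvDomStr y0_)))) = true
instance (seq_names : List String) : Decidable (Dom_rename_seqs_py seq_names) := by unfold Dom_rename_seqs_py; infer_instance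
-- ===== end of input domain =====

-- B is faster: instead of A's per-element full-list count and prefix-slice count, B groups
-- each name's positions into a dict in one pass and then scatters the suffixed names into a
-- preallocated output array group by group (the suffix is the rank inside the group).

-- shared formatting helper: '%s.%d' % (name, ind)
def pyFmtDot (name : String) (ind : Int) : String :=
  String.ofList (name.toList ++ '.' :: PySem.Int.toChars ind)

-- ===== PORT A =====
def rename_seqs_py (seq_names : List String) : List String :=
  (PySem.List.enumerate seq_names).foldl
    (fun renamed_seqs p =>
      let seq_name := p.2
      if seq_names.count seq_name = 1 then
        renamed_seqs ++ [seq_name]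
      else
        let ind := (PySem.List.slice seq_names none (some (p.1 + 1))).count seq_name
        renamed_seqs ++ [pyFmtDot seq_name (ind : Int)])
    []

-- ===== PORT B =====
-- first loop of Source B: positions.setdefault(name, []).append(i); the enumerate indices are
-- nonnegative list positions, so they are modelled as Nat and out[i] = v is List.set (exact there)
def buildPositions (seq_names : List String) : PySem.Dict String (List Nat) :=
  seq_names.zipIdx.foldl (fun d p => d.modify p.1 [] (· ++ [p.2])) PySem.Dict.empty

def rename_seqs_py_alt (seq_names : List String) : List String :=
  (buildPositions seq_names).items.foldl
    (fun out p =>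
      if p.2.length = 1 then
        out.set (p.2.headD 0) p.1
      else
        p.2.zipIdx.foldl (fun o q => o.set q.1 (pyFmtDot p.1 ((q.2 : Int) + 1))) out)
    (List.replicate seq_names.length "")

-- ===== PRECONDITION & SPEC =====
def Spec_rename_seqs_py (seq_names : List String) (out : List String) : Prop := out = rename_seqs_py_alt seq_names
instance (seq_names : List String) (out : List String) : Decidable (Spec_rename_seqs_py seq_names out) := by unfold Spec_rename_seqs_py; infer_instance

-- ===== CLAIM (what is proved, stated in full; the proofs are below) =====
def Claim_equal_rename_seqs_py : Prop := ∀ (seq_names : List String), Dom_rename_seqs_py seq_names → Spec_rename_seqs_py seq_names (rename_seqs_py seq_names)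

-- ===== LEMMAS AND PROOFS =====

-- canonical value of the output at index i
def valFor (all : List String) (i : Nat) : String :=
  if all.count (all.getD i "") = 1 then all.getD i ""
  else pyFmtDot (all.getD i "") (((all.take i).count (all.getD i "") : Int) + 1)

-- the positions at which a name occurs, in increasing order
def posOf (all : List String) (c : String) : List Nat :=
  (all.zipIdx.filter (fun p => p.1 == c)).map (·.2)

theorem posOf_append (all : List String) (x c : String) :
    posOf (all ++ [x]) c = posOf all c ++ (if x = c then [all.length] else []) := by
  unfold posOf
  rw [List.zipIdx_append]
  by_cases hx : x = c <;> simp [List.filter_append, hx]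

theorem posOf_length (all : List String) (c : String) :
    (posOf all c).length = all.count c := by
  induction all using List.reverseRecOn with
  | nil => simp [posOf]
  | append_singleton all x ih =>
    rw [posOf_append]
    by_cases hx : x = c <;> simp [List.count_append, hx, ih]

theorem mem_posOf (all : List String) (c : String) (i : Nat) :
    i ∈ posOf all c ↔ i < all.length ∧ all.getD i "" = c := by
  induction all using List.reverseRecOn with
  | nil => simp [posOf]
  | append_singleton all x ih =>
    rw [posOf_append, List.mem_append, ih]
    constructor
    · rintro (⟨h1, h2⟩ | hmem)
      · refine ⟨by simp; omega, ?_⟩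
        rw [List.getD_eq_getElem?_getD, List.getElem?_append_left h1,
          ← List.getD_eq_getElem?_getD, h2]
      · by_cases hx : x = c
        · simp only [if_pos hx, List.mem_singleton] at hmem
          subst hmem
          refine ⟨by simp, ?_⟩
          rw [List.getD_eq_getElem?_getD, List.getElem?_append_right (le_refl _)]
          simpa using hx
        · simp [hx] at hmem
    · rintro ⟨h1, h2⟩
      by_cases hi : i < all.length
      · left
        refine ⟨hi, ?_⟩
        rw [List.getD_eq_getElem?_getD, List.getElem?_append_left hi,
          ← List.getD_eq_getElem?_getD] at h2
        exact h2
      · have hieq : i = all.length := by simp at h1; omega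
        subst hieq
        rw [List.getD_eq_getElem?_getD, List.getElem?_append_right (le_refl _)] at h2
        simp at h2
        simp [h2]

theorem posOf_spec (all : List String) (c : String) :
    ∀ k (hk : k < (posOf all c).length),
      (posOf all c)[k] < all.length ∧
      all.getD ((posOf all c)[k]) "" = c ∧
      (all.take ((posOf all c)[k])).count c = k := by
  induction all using List.reverseRecOn with
  | nil => simp [posOf]
  | append_singleton all x ih =>
    intro k hk
    simp only [posOf_append] at hk ⊢
    by_cases hlt : k < (posOf all c).length
    · rw [List.getElem_append_left hlt]
      obtain ⟨h1, h2, h3⟩ := ih k hlt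
      refine ⟨by simp; omega, ?_, ?_⟩
      · rw [List.getD_eq_getElem?_getD, List.getElem?_append_left h1,
          ← List.getD_eq_getElem?_getD]
        exact h2
      · rw [List.take_append_of_le_length (le_of_lt h1)]
        exact h3
    · have hx : x = c := by
        by_contra hxc
        simp [hxc] at hk
        omega
      simp only [if_pos hx] at hk ⊢
      have hklen : k < (posOf all c).length + 1 := by simpa using hk
      have hkeq : k = (posOf all c).length := by omega
      rw [List.getElem_append_right (by omega)]
      have h0 : k - (posOf all c).length = 0 := by omega
      simp only [h0, List.getElem_cons_zero]
      refine ⟨by simp, ?_, ?_⟩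
      · rw [List.getD_eq_getElem?_getD, List.getElem?_append_right (le_refl _)]
        simpa using hx
      · rw [List.take_append_of_le_length (le_refl _), List.take_length,
          ← posOf_length all c]
        omega

-- write phase: a fold of point writes of a fixed function
theorem foldl_set_length (f : Nat → String) :
    ∀ (ps : List Nat) (out : List String),
      (ps.foldl (fun o i => o.set i (f i)) out).length = out.length := by
  intro ps
  induction ps with
  | nil => intro out; rfl
  | cons i ps ih => intro out; rw [List.foldl_cons, ih]; simp

theorem foldl_set_getD (f : Nat → String) :
    ∀ (ps : List Nat) (out : List String) (j : Nat),
      (ps.foldl (fun o i => o.set i (f i)) out).getD j "" =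
        if j ∈ ps ∧ j < out.length then f j else out.getD j "" := by
  intro ps
  induction ps with
  | nil => intro out j; simp
  | cons i ps ih =>
    intro out j
    rw [List.foldl_cons, ih]
    simp only [List.length_set, List.getD_eq_getElem?_getD, List.getElem?_set, List.mem_cons]
    by_cases hji : i = j
    · subst hji
      by_cases hjl : i < out.length <;> by_cases hjp : i ∈ ps <;> simp [hjl, hjp]
    · have hji' : ¬ j = i := fun h => hji h.symm
      by_cases hjl : j < out.length <;> by_cases hjp : j ∈ ps <;>
        simp [hji, hji', hjl, hjp]

theorem zipIdx_foldl_set (g : Nat → Nat → String) (f : Nat → String) :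
    ∀ (xs : List Nat) (s : Nat) (out : List String),
      (∀ k (hk : k < xs.length), g xs[k] (s + k) = f xs[k]) →
      (xs.zipIdx s).foldl (fun o q => o.set q.1 (g q.1 q.2)) out
        = xs.foldl (fun o i => o.set i (f i)) out := by
  intro xs
  induction xs with
  | nil => intro s out _; rfl
  | cons x xs ih =>
    intro s out hg
    rw [List.zipIdx_cons, List.foldl_cons, List.foldl_cons]
    have h0 : g x s = f x := by simpa using hg 0 (by simp)
    rw [h0]
    refine ih (s + 1) _ (fun k hk => ?_)
    have := hg (k + 1) (by simpa using Nat.succ_lt_succ hk)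
    simpa [Nat.add_assoc, Nat.add_comm 1 k] using this

theorem group_eq (all : List String) (name : String) (idxs : List Nat)
    (out : List String) (h : idxs = posOf all name) :
    (if idxs.length = 1 then out.set (idxs.headD 0) name
     else idxs.zipIdx.foldl (fun o q => o.set q.1 (pyFmtDot name ((q.2 : Int) + 1))) out)
    = idxs.foldl (fun o i => o.set i (valFor all i)) out := by
  subst h
  have hlen := posOf_length all name
  by_cases h1 : (posOf all name).length = 1
  · obtain ⟨i, hi⟩ := List.length_eq_one_iff.mp h1
    have hk : 0 < (posOf all name).length := by omega
    obtain ⟨_, h2, _⟩ := posOf_spec all name 0 hk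
    simp only [hi, List.getElem_cons_zero] at h2
    have hc1 : all.count name = 1 := by omega
    have hv : valFor all i = name := by
      unfold valFor
      rw [h2, hc1]
      simp
    simp [hi, hv]
  · simp only [h1, if_false]
    refine zipIdx_foldl_set (fun _ k => pyFmtDot name ((k : Int) + 1)) (valFor all)
      (posOf all name) 0 out (fun k hk => ?_)
    obtain ⟨_, h2, h3⟩ := posOf_spec all name k hk
    have hne : all.count name ≠ 1 := by omega
    unfold valFor
    rw [h2]
    simp [hne, h3]

theorem foldl_groups (all : List String) :
    ∀ (gs : List (String × List Nat)) (out : List String),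
      (∀ p ∈ gs, p.2 = posOf all p.1) →
      gs.foldl
        (fun out p =>
          if p.2.length = 1 then out.set (p.2.headD 0) p.1
          else p.2.zipIdx.foldl (fun o q => o.set q.1 (pyFmtDot p.1 ((q.2 : Int) + 1))) out)
        out
      = (gs.flatMap (·.2)).foldl (fun o i => o.set i (valFor all i)) out := by
  intro gs
  induction gs with
  | nil => intro out _; rfl
  | cons p gs ih =>
    intro out hg
    rw [List.foldl_cons, group_eq all p.1 p.2 out (hg p (by simp)),
      List.flatMap_cons, List.foldl_append]
    exact ih _ (fun q hq => hg q (List.mem_cons_of_mem _ hq))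

-- A-side characterisation: element produced for x after prefix pre of the full list all
def renElem (all pre : List String) (x : String) : String :=
  if all.count x = 1 then x else pyFmtDot x ((pre.count x : Int) + 1)

def renList (all pre rest : List String) : List String :=
  match rest with
  | [] => []
  | x :: r => renElem all pre x :: renList all (pre ++ [x]) r

theorem renA (all : List String) :
    ∀ (rest pre acc : List String), all = pre ++ rest →
      (PySem.List.enumerate rest (pre.length : Int)).foldl
        (fun renamed_seqs p =>
          let seq_name := p.2
          if all.count seq_name = 1 then
            renamed_seqs ++ [seq_name]
          else
            let ind := (PySem.List.slice all none (some (p.1 + 1))).count seq_name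
            renamed_seqs ++ [pyFmtDot seq_name (ind : Int)])
        acc = acc ++ renList all pre rest := by
  intro rest
  induction rest with
  | nil => intro pre acc h; simp [PySem.List.enumerate, renList]
  | cons x r ih =>
    intro pre acc h
    rw [PySem.List.enumerate_cons, List.foldl_cons]
    have hsl : PySem.List.slice all none (some ((pre.length : Int) + 1))
        = pre ++ [x] := by
      have h0 : (0 : Int) ≤ (pre.length : Int) + 1 := by omega
      rw [PySem.List.slice_to all h0]
      have ht : ((pre.length : Int) + 1).toNat = pre.length + 1 := by omega
      rw [ht, h, show pre ++ x :: r = (pre ++ [x]) ++ r from by simp]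
      exact List.take_left' (by simp)
    have hlen : ((pre ++ [x]).length : Int) = (pre.length : Int) + 1 := by
      simp
    rw [← hlen, ih (pre ++ [x]) _ (by simpa using h)]
    simp only [renList, renElem]
    by_cases hc : all.count x = 1 <;> simp [hc, hsl, List.append_assoc]

theorem renList_map (all : List String) :
    ∀ (rest pre : List String), all = pre ++ rest →
      renList all pre rest
        = (List.range rest.length).map (fun j => valFor all (pre.length + j)) := by
  intro rest
  induction rest with
  | nil => intro pre _; simp [renList]
  | cons x r ih =>
    intro pre h
    have hx : all.getD pre.length "" = x := by
      rw [h, List.getD_eq_getElem?_getD, List.getElem?_append_right (le_refl _)]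
      simp
    have ht : all.take pre.length = pre := by
      rw [h]; exact List.take_left' rfl
    have hhead : renElem all pre x = valFor all (pre.length + 0) := by
      unfold renElem valFor
      rw [Nat.add_zero, hx, ht]
    have htail := ih (pre ++ [x]) (by simpa using h)
    rw [show renList all pre (x :: r) = renElem all pre x :: renList all (pre ++ [x]) r from rfl,
      hhead, htail]
    rw [show (x :: r).length = r.length + 1 from rfl, List.range_succ_eq_map]
    simp only [List.map_cons, List.map_map]
    congr 1
    refine List.map_congr_left (fun j _ => ?_)
    simp only [Function.comp_apply, List.length_append, List.length_cons, List.length_nil]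
    congr 1
    omega

-- ===== VERDICT (by name: the statement is the Claim_ definition above) =====
theorem rename_seqs_py_spec : Claim_equal_rename_seqs_py := by
  intro all _
  show rename_seqs_py all = rename_seqs_py_alt all
  have hA : rename_seqs_py all = (List.range all.length).map (valFor all) := by
    unfold rename_seqs_py
    have h := renA all all [] [] (by simp)
    simp only [List.length_nil, Int.ofNat_zero] at h
    rw [h, renList_map all all [] (by simp)]
    simp
  have hgetD : ∀ c, (buildPositions all).getD c [] = posOf all c := by
    intro c
    unfold buildPositions posOf
    rw [PySem.Dict.getD_foldl_modify_append]
    simp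
  have hnodup : (buildPositions all).keys.Nodup := by
    unfold buildPositions
    exact PySem.Dict.nodup_keys_foldl_modify_key _ _ _ _ _ PySem.Dict.nodup_keys_empty
  have hitems : ∀ p ∈ (buildPositions all).items, p.2 = posOf all p.1 := by
    rintro ⟨k, v⟩ hp
    have := PySem.Dict.getD_of_mem_items (buildPositions all) hp hnodup ([] : List Nat)
    rw [← this, hgetD]
  have hcover : ∀ j, j < all.length → ∃ p ∈ (buildPositions all).items, p.1 = all.getD j "" := by
    intro j hj
    have hmem : all.getD j "" ∈ all := by
      rw [List.getD_eq_getElem all "" hj]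
      exact List.getElem_mem hj
    have hk : all.getD j "" ∈ (buildPositions all).keys := by
      unfold buildPositions
      rw [PySem.Dict.keys_foldl_modify_key]
      refine (PySem.Set.mem_update _ _ _).mpr (Or.inr ?_)
      simpa using hmem
    simp only [PySem.Dict.keys, List.mem_map] at hk
    obtain ⟨p, hp, hpe⟩ := hk
    exact ⟨p, hp, hpe⟩
  unfold rename_seqs_py_alt
  rw [hA, foldl_groups all _ _ hitems]
  apply List.ext_getElem
  · rw [foldl_set_length]
    simp
  · intro j h1 h2
    have hj : j < all.length := by simpa using h1
    rw [← List.getD_eq_getElem _ "" h1, ← List.getD_eq_getElem _ "" h2,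
      foldl_set_getD]
    have hcond : j ∈ (buildPositions all).items.flatMap (·.2) ∧
        j < (List.replicate all.length "").length := by
      refine ⟨?_, by simpa using hj⟩
      obtain ⟨p, hp, hpe⟩ := hcover j hj
      refine List.mem_flatMap.mpr ⟨p, hp, ?_⟩
      rw [hitems p hp, hpe, mem_posOf]
      exact ⟨hj, rfl⟩
    rw [if_pos hcond, List.getD_eq_getElem _ "" h1]
    simp
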